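-- pv_equiv track=rewrite | github.com/scooter7/socialmediamonitoring | brandmonitoring.py | analyze_sentiment_by_platform
-- ===== SOURCE A (Python) =====
-- def analyze_sentiment_by_platform(mentions):
--     sentiment_results = {}
--     for platform, posts in mentions.items():
--         platform_sentiments = {"positive": 0, "negative": 0, "neutral": 0}
--         if not posts:  # If no posts were retrieved for the platform
--             sentiment_results[platform] = platform_sentiments
--             continue
--         for post in posts:
--             # Example placeholder: replace with actual sentiment analysis
--             sentiment = "neutral"  # Assuming a dummy sentiment
--             platform_sentiments[sentiment] += 1
--         sentiment_results[platform] = platform_sentiments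
--     return sentiment_results
-- ===== SOURCE B (Python) =====
-- def analyze_sentiment_by_platform(mentions):
--     # Dummy sentiment: every post is "neutral", so the neutral bucket is just len(posts).
--     return {platform: {"positive": 0, "negative": 0, "neutral": len(posts)}
--             for platform, posts in mentions.items()}
-- ===== Notes on version B (the rewrite author's own statement) =====
-- stated objective: simpler
-- what changed: Replaces the nested per-post counting loop and the empty-posts branch with a single dict comprehension that sets the neutral bucket to len(posts) directly (closed form instead of iteration).
import Mathlib
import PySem

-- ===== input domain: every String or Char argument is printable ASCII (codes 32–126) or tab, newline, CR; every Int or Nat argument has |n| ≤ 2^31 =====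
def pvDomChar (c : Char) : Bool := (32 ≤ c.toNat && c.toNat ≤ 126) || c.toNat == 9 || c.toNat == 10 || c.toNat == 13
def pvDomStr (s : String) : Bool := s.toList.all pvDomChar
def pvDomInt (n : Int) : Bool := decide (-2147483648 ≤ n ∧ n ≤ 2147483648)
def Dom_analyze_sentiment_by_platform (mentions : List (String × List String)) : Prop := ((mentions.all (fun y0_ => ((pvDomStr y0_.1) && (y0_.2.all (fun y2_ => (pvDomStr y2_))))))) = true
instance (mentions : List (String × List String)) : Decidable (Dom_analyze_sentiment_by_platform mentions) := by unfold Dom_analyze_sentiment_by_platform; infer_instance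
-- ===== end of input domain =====

-- B replaces A's nested per-post counting loop with a single map putting len(posts) in the neutral bucket (simpler).


-- ===== PORT A =====
def analyze_sentiment_by_platform (mentions : List (String × List String)) : List (String × List (String × Int)) :=
  let sentiment_results : PySem.Dict String (PySem.Dict String Int) :=
    mentions.foldl (fun sentiment_results pp =>
      let platform := pp.1
      let posts := pp.2
      let platform_sentiments : PySem.Dict String Int :=
        PySem.Dict.ofList [("positive", 0), ("negative", 0), ("neutral", 0)]
      if posts = [] then
        sentiment_results.insert platform platform_sentiments
      else
        let platform_sentiments :=
          posts.foldl (fun platform_sentiments _post =>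
            let sentiment := "neutral"
            platform_sentiments.modify sentiment 0 (· + 1)) platform_sentiments
        sentiment_results.insert platform platform_sentiments)
      PySem.Dict.empty
  sentiment_results.items.map (fun p => (p.1, p.2.items))

-- ===== PORT B =====
def analyze_sentiment_by_platform_alt (mentions : List (String × List String)) : List (String × List (String × Int)) :=
  mentions.map (fun p =>
    (p.1, [("positive", (0 : Int)), ("negative", 0), ("neutral", (p.2.length : Int))]))

-- ===== PRECONDITION & SPEC =====
-- Pre_ excludes association lists with duplicate platform keys: the Python argument is a dict,
-- whose keys are necessarily distinct, so no input the Python function can receive is excluded.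
def Pre_analyze_sentiment_by_platform (mentions : List (String × List String)) : Prop :=
  (mentions.map Prod.fst).Nodup
instance (mentions : List (String × List String)) : Decidable (Pre_analyze_sentiment_by_platform mentions) := by unfold Pre_analyze_sentiment_by_platform; infer_instance
def pvWitness_analyze_sentiment_by_platform : (List (String × List String)) :=
  [("twitter", ["a", "b"]), ("reddit", [])]
def Spec_analyze_sentiment_by_platform (mentions : List (String × List String)) (out : List (String × List (String × Int))) : Prop := out = analyze_sentiment_by_platform_alt mentions
instance (mentions : List (String × List String)) (out : List (String × List (String × Int))) : Decidable (Spec_analyze_sentiment_by_platform mentions out) := by unfold Spec_analyze_sentiment_by_platform; infer_instance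

-- ===== CLAIM (what is proved, stated in full; the proofs are below) =====
def Claim_equal_analyze_sentiment_by_platform : Prop := ∀ (mentions : List (String × List String)), Dom_analyze_sentiment_by_platform mentions → Pre_analyze_sentiment_by_platform mentions → Spec_analyze_sentiment_by_platform mentions (analyze_sentiment_by_platform mentions)

-- ===== LEMMAS AND PROOFS =====

-- one step of A's inner loop only bumps the "neutral" bucket
theorem pv_modify_neutral (n : Int) :
    (PySem.Dict.ofList [("positive", (0:Int)), ("negative", 0), ("neutral", n)]).modify "neutral" 0 (· + 1)
      = PySem.Dict.ofList [("positive", 0), ("negative", 0), ("neutral", n + 1)] := by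
  rfl

-- A's inner loop counts the posts into the "neutral" bucket
theorem pv_inner (posts : List String) (n : Int) :
    posts.foldl (fun d _ => d.modify "neutral" 0 (· + 1))
      (PySem.Dict.ofList [("positive", (0:Int)), ("negative", 0), ("neutral", n)])
      = PySem.Dict.ofList [("positive", 0), ("negative", 0), ("neutral", n + posts.length)] := by
  induction posts generalizing n with
  | nil => simp
  | cons p ps ih =>
      simp only [List.foldl_cons, pv_modify_neutral, ih, List.length_cons]
      have : n + 1 + (ps.length : Int) = n + ((ps.length : Int) + 1) := by omega
      rw [this]
      push_cast
      ring_nf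

-- A's outer loop, as an invariant over the accumulator dict
theorem pv_outer (mentions : List (String × List String))
    (acc : PySem.Dict String (PySem.Dict String Int))
    (hnd : (mentions.map Prod.fst).Nodup)
    (hdisj : ∀ k ∈ mentions.map Prod.fst, acc.contains k = false) :
    (mentions.foldl (fun sentiment_results pp =>
      let platform := pp.1
      let posts := pp.2
      let platform_sentiments : PySem.Dict String Int :=
        PySem.Dict.ofList [("positive", 0), ("negative", 0), ("neutral", 0)]
      if posts = [] then
        sentiment_results.insert platform platform_sentiments
      else
        let platform_sentiments :=
          posts.foldl (fun platform_sentiments _post =>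
            platform_sentiments.modify "neutral" 0 (· + 1)) platform_sentiments
        sentiment_results.insert platform platform_sentiments) acc).items.map
        (fun p => (p.1, p.2.items))
      = acc.items.map (fun p => (p.1, p.2.items)) ++ analyze_sentiment_by_platform_alt mentions := by
  induction mentions generalizing acc with
  | nil => simp [analyze_sentiment_by_platform_alt]
  | cons pp rest ih =>
      obtain ⟨platform, posts⟩ := pp
      simp only [List.map_cons, List.nodup_cons] at hnd
      have hne : acc.contains platform = false := hdisj platform (by simp)
      have hins : ∀ (v : PySem.Dict String Int),
          ((acc.insert platform v).items.map (fun p => (p.1, p.2.items)))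
            = acc.items.map (fun p => (p.1, p.2.items)) ++ [(platform, v.items)] := by
        intro v
        rw [PySem.Dict.items_insert]
        simp [hne]
      have hdisj' : ∀ (v : PySem.Dict String Int), ∀ k ∈ rest.map Prod.fst,
          (acc.insert platform v).contains k = false := by
        intro v k hk
        rw [PySem.Dict.contains_insert]
        have hk1 : k ≠ platform := by
          intro h; exact hnd.1 (h ▸ hk)
        have hk2 : acc.contains k = false := hdisj k (by simp [hk])
        simp [hk1, hk2]
      by_cases hp : posts = []
      · subst hp
        simp only [List.foldl_cons, if_true]
        rw [ih _ hnd.2 (hdisj' _), hins]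
        simp only [analyze_sentiment_by_platform_alt, List.map_cons, List.append_assoc,
          List.singleton_append]
        rfl
      · simp only [List.foldl_cons, if_neg hp]
        rw [ih _ hnd.2 (hdisj' _), hins, pv_inner]
        simp only [analyze_sentiment_by_platform_alt, List.map_cons, List.append_assoc,
          List.singleton_append, zero_add]
        rfl

-- ===== VERDICT (by name: the statement is the Claim_ definition above) =====
theorem analyze_sentiment_by_platform_spec : Claim_equal_analyze_sentiment_by_platform := by
  intro mentions _ hpre
  unfold Spec_analyze_sentiment_by_platform analyze_sentiment_by_platform
  rw [pv_outer mentions PySem.Dict.empty hpre (by intro k _; simp [PySem.Dict.contains_empty])]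
  rfl
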